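-- pv_equiv track=rewrite | github.com/mati1yas/LeetCode-Solutions | 1040-moving-stones-until-consecutive-ii/1040-moving-stones-until-consecutive-ii.py | numMovesStonesII
-- ===== SOURCE A (Python) =====
-- from typing import List
--
-- def numMovesStonesII(stones: List[int]) -> List[int]:
--
--     arr=sorted(stones)
--
--     right=0
--     left=0
--     n=len(arr)
--
--     high=max(arr[n-1]-arr[1]-n+2,arr[n-2]-arr[0]-n+2)
--
--
--     low=len(arr)
--
--
--     for right in range(n):
--
--         while arr[right]-arr[left]>=n:
--             left+=1
--
--
--         if  right-left+1==n-1 and arr[right]-arr[left]==n-2 :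
--             low=min(low,2)
--         else:
--             low=min(low,n-(right-left+1))
--
--
--     return [low,high]
-- ===== SOURCE B (Python) =====
-- from typing import List
--
-- def numMovesStonesII(stones: List[int]) -> List[int]:
--     arr = sorted(stones)
--     n = len(arr)
--     high = max(arr[-1] - arr[1], arr[-2] - arr[0]) - (n - 2)
--
--     def below(v):
--         # number of stones with value <= v (binary search over the whole array)
--         lo, hi = 0, n
--         while lo < hi:
--             mid = (lo + hi) // 2
--             if arr[mid] <= v:
--                 lo = mid + 1
--             else:
--                 hi = mid
--         return lo
--
--     def moves(r):
--         l = below(arr[r] - n)  # first index inside the length-n window ending at arr[r]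
--         cnt = r + 1 - l
--         return 2 if cnt == n - 1 and arr[r] - arr[l] == n - 2 else n - cnt
--
--     low = min(moves(r) for r in range(n))
--     return [low, high]
-- ===== Notes on version B (the rewrite author's own statement) =====
-- stated objective: alternative
-- what changed: A's stateful two-pointer sweep (a left pointer carried across iterations with a running minimum fold) is replaced by a stateless pass that finds each window start with a value-based binary search over the whole sorted array and takes low as min() over the per-index values.
import Mathlib
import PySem

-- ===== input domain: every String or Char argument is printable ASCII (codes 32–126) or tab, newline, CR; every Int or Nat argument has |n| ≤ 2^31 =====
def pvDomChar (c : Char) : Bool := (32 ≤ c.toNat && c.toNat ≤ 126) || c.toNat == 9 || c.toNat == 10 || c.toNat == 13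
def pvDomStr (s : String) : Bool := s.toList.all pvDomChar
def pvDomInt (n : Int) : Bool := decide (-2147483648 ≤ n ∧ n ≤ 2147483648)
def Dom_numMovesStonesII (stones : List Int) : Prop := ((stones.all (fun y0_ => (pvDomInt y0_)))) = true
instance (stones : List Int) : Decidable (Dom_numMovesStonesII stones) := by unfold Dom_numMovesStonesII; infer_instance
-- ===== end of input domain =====

-- B replaces A's stateful two-pointer sweep (a left pointer carried across iterations with a running minimum)
-- by a stateless pass: each window start is found by a value-based binary search over the whole sorted array,
-- and low is min() over the per-index values (objective: alternative, same O(n log n) cost).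

-- ===== PORT A =====
-- the `while arr[right]-arr[left]>=n: left+=1` loop; `left < r` is a totality guard only
-- (on the sorted arr the condition is false at left = r, so the guard never fires first)
def pvAdvanceGo (arr : List Int) (n : Int) (r : Nat) : Nat → Nat → Nat
  | 0, left => left
  | fuel + 1, left =>
    if left < r ∧ n ≤ arr.getD r 0 - arr.getD left 0 then pvAdvanceGo arr n r fuel (left + 1)
    else left

def pvAdvance (arr : List Int) (n : Int) (r : Nat) (left : Nat) : Nat :=
  pvAdvanceGo arr n r (r - left) left

def numMovesStonesII (stones : List Int) : List Int :=
  let arr := PySem.List.sorted stones (fun x => x) false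
  let n : Int := arr.length
  let high := max (arr.getD (arr.length - 1) 0 - arr.getD 1 0 - n + 2)
                  (arr.getD (arr.length - 2) 0 - arr.getD 0 0 - n + 2)
  let st := (List.range arr.length).foldl (fun (st : Nat × Int) r =>
      let left := pvAdvance arr n r st.1
      if ((r : Int) - left + 1 = n - 1) ∧ (arr.getD r 0 - arr.getD left 0 = n - 2) then
        (left, min st.2 2)
      else
        (left, min st.2 (n - ((r : Int) - left + 1)))) (0, n)
  [st.2, high]

-- ===== PORT B =====
-- Source B's `below(v)`: the `while lo < hi` binary search counting stones with value ≤ v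
def pvBelowGo (arr : List Int) (v : Int) : Nat → Nat → Nat → Nat
  | 0, lo, _ => lo
  | fuel + 1, lo, hi =>
    if lo < hi then
      let mid := (lo + hi) / 2
      if arr.getD mid 0 ≤ v then pvBelowGo arr v fuel (mid + 1) hi
      else pvBelowGo arr v fuel lo mid
    else lo

def pvBelow (arr : List Int) (v : Int) (lo hi : Nat) : Nat :=
  pvBelowGo arr v (hi - lo) lo hi

-- Source B's `moves(r)`
def pvMv (arr : List Int) (n : Int) (r : Nat) : Int :=
  let l : Nat := pvBelow arr (arr.getD r 0 - n) 0 arr.length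
  let cnt : Int := (r : Int) + 1 - l
  if (cnt = n - 1) ∧ (arr.getD r 0 - arr.getD l 0 = n - 2) then 2
  else n - cnt

def numMovesStonesII_alt (stones : List Int) : List Int :=
  let arr := PySem.List.sorted stones (fun x => x) false
  let n : Int := arr.length
  let high := max (arr.getD (arr.length - 1) 0 - arr.getD 1 0)
                  (arr.getD (arr.length - 2) 0 - arr.getD 0 0) - (n - 2)
  let low := match (List.range arr.length).map (pvMv arr n) with
    | [] => 0   -- unreachable under Pre_ (Python min() would raise on an empty sequence)
    | x :: xs => xs.foldl min x
  [low, high]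

-- ===== PRECONDITION & SPEC =====
-- with fewer than 2 stones the Python A raises IndexError (arr[1] / arr[-1])
def Pre_numMovesStonesII (stones : List Int) : Prop := 2 ≤ stones.length
instance (stones : List Int) : Decidable (Pre_numMovesStonesII stones) := by
  unfold Pre_numMovesStonesII; infer_instance
def pvWitness_numMovesStonesII : List Int := [1, 5]

def Spec_numMovesStonesII (stones : List Int) (out : List Int) : Prop := out = numMovesStonesII_alt stones
instance (stones : List Int) (out : List Int) : Decidable (Spec_numMovesStonesII stones out) := by unfold Spec_numMovesStonesII; infer_instance

-- ===== CLAIM (what is proved, stated in full; the proofs are below) =====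
def Claim_equal_numMovesStonesII : Prop := ∀ (stones : List Int), Dom_numMovesStonesII stones → Pre_numMovesStonesII stones → Spec_numMovesStonesII stones (numMovesStonesII stones)

-- ===== LEMMAS AND PROOFS =====

-- sorted access is monotone
theorem pv_getD_mono (arr : List Int) (h : arr.Pairwise (· ≤ ·)) {i j : Nat}
    (hij : i ≤ j) (hj : j < arr.length) : arr.getD i 0 ≤ arr.getD j 0 := by
  rw [List.getD_eq_getElem arr 0 (by omega), List.getD_eq_getElem arr 0 hj]
  rcases Nat.eq_or_lt_of_le hij with rfl | hlt
  · exact le_refl _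
  · exact List.pairwise_iff_getElem.mp h i j (by omega) hj hlt

-- pvAdvance: starting below r, returns m with everything in [left, m) still ≥ n and failure at m (or m = r)
theorem pvAdvanceGo_spec (arr : List Int) (n : Int) (r : Nat) :
    ∀ fuel left, left ≤ r → r - left ≤ fuel →
    left ≤ pvAdvanceGo arr n r fuel left ∧ pvAdvanceGo arr n r fuel left ≤ r ∧
    (∀ j, left ≤ j → j < pvAdvanceGo arr n r fuel left → n ≤ arr.getD r 0 - arr.getD j 0) ∧
    (pvAdvanceGo arr n r fuel left < r → arr.getD r 0 - arr.getD (pvAdvanceGo arr n r fuel left) 0 < n) := by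
  intro fuel
  induction fuel with
  | zero =>
    intro left hlr hfuel
    have heq : left = r := by omega
    subst heq
    exact ⟨le_refl _, le_refl _, by intro j h1 h2; simp [pvAdvanceGo] at h2; omega,
      by intro hc; simp [pvAdvanceGo] at hc⟩
  | succ fuel ih =>
    intro left hlr hfuel
    show left ≤ pvAdvanceGo arr n r (fuel + 1) left ∧ _
    rw [pvAdvanceGo]
    split_ifs with h
    · have ihs := ih (left + 1) (by omega) (by omega)
      refine ⟨by omega, ihs.2.1, ?_, ihs.2.2.2⟩
      intro j hj1 hj2
      rcases Nat.eq_or_lt_of_le hj1 with rfl | h'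
      · exact h.2
      · exact ihs.2.2.1 j (by omega) hj2
    · have h' : left < r → arr.getD r 0 - arr.getD left 0 < n := by
        intro hlt; by_contra hc; exact h ⟨hlt, by omega⟩
      exact ⟨le_refl _, hlr, by intro j h1 h2; omega, h'⟩

theorem pvAdvance_spec (arr : List Int) (n : Int) (r : Nat) (left : Nat) (hlr : left ≤ r) :
    left ≤ pvAdvance arr n r left ∧ pvAdvance arr n r left ≤ r ∧
    (∀ j, left ≤ j → j < pvAdvance arr n r left → n ≤ arr.getD r 0 - arr.getD j 0) ∧
    (pvAdvance arr n r left < r → arr.getD r 0 - arr.getD (pvAdvance arr n r left) 0 < n) :=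
  pvAdvanceGo_spec arr n r (r - left) left hlr (le_refl _)

-- pvBelow on a sorted array: everything strictly below the result is ≤ v, the result itself is > v (or = hi)
theorem pvBelowGo_spec (arr : List Int) (v : Int) (h : arr.Pairwise (· ≤ ·)) :
    ∀ fuel lo hi, hi ≤ arr.length → hi - lo ≤ fuel → lo ≤ hi →
    lo ≤ pvBelowGo arr v fuel lo hi ∧ pvBelowGo arr v fuel lo hi ≤ hi ∧
    (∀ j, lo ≤ j → j < pvBelowGo arr v fuel lo hi → arr.getD j 0 ≤ v) ∧
    (pvBelowGo arr v fuel lo hi < hi → v < arr.getD (pvBelowGo arr v fuel lo hi) 0) := by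
  intro fuel
  induction fuel with
  | zero =>
    intro lo hi hlen hfuel hle
    have heq : lo = hi := by omega
    subst heq
    exact ⟨le_refl _, le_refl _, by intro j h1 h2; simp [pvBelowGo] at h2; omega,
      by intro hc; simp [pvBelowGo] at hc⟩
  | succ fuel ih =>
    intro lo hi hlen hfuel hle
    show lo ≤ pvBelowGo arr v (fuel + 1) lo hi ∧ _
    rw [pvBelowGo]
    by_cases h1 : lo < hi
    · have hmid1 : lo ≤ (lo + hi) / 2 := by omega
      have hmid2 : (lo + hi) / 2 < hi := by omega
      by_cases h2 : arr.getD ((lo + hi) / 2) 0 ≤ v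
      · simp only [h1, h2, if_true]
        have hrec := ih ((lo + hi) / 2 + 1) hi hlen (by omega) (by omega)
        refine ⟨by omega, hrec.2.1, ?_, hrec.2.2.2⟩
        intro j hj1 hj2
        rcases Nat.lt_or_ge j ((lo + hi) / 2 + 1) with hj | hj
        · have hmono := pv_getD_mono arr h (i := j) (j := (lo + hi) / 2) (by omega) (by omega)
          omega
        · exact hrec.2.2.1 j hj hj2
      · simp only [h1, h2, if_true, if_false]
        have hrec := ih lo ((lo + hi) / 2) (by omega) (by omega) (by omega)
        refine ⟨hrec.1, by omega, hrec.2.2.1, ?_⟩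
        intro _
        rcases Nat.lt_or_ge (pvBelowGo arr v fuel lo ((lo + hi) / 2)) ((lo + hi) / 2) with hc | hc
        · exact hrec.2.2.2 hc
        · have heq : pvBelowGo arr v fuel lo ((lo + hi) / 2) = (lo + hi) / 2 := by omega
          rw [heq]
          omega
    · simp only [h1, if_false]
      exact ⟨le_refl _, hle, by intro j hj1 hj2; omega, by intro hc; exact hc.elim⟩

theorem pvBelow_spec (arr : List Int) (v : Int) (h : arr.Pairwise (· ≤ ·))
    (hi : Nat) (hlen : hi ≤ arr.length) :
    pvBelow arr v 0 hi ≤ hi ∧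
    (∀ j, j < pvBelow arr v 0 hi → arr.getD j 0 ≤ v) ∧
    (pvBelow arr v 0 hi < hi → v < arr.getD (pvBelow arr v 0 hi) 0) := by
  have hs := pvBelowGo_spec arr v h hi 0 hi hlen (le_refl _) (Nat.zero_le hi)
  exact ⟨hs.2.1, fun j hj => hs.2.2.1 j (Nat.zero_le j) hj, hs.2.2.2⟩

-- proof-only abbreviations for A's loop body and B's running minimum
def pvStepA (arr : List Int) (n : Int) (st : Nat × Int) (r : Nat) : Nat × Int :=
  let left := pvAdvance arr n r st.1
  if ((r : Int) - left + 1 = n - 1) ∧ (arr.getD r 0 - arr.getD left 0 = n - 2) then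
    (left, min st.2 2)
  else
    (left, min st.2 (n - ((r : Int) - left + 1)))

def pvStepB (arr : List Int) (n : Int) (low : Int) (r : Nat) : Int :=
  min low (pvMv arr n r)

-- the search never lands past r, so B's per-index value never exceeds n
-- (used to absorb A's initial accumulator n)
theorem pvMv_le (arr : List Int) (n : Int) (hsort : arr.Pairwise (· ≤ ·)) (hn : 2 ≤ n)
    (r : Nat) : pvMv arr n r ≤ n := by
  unfold pvMv
  dsimp only
  have hs := pvBelow_spec arr (arr.getD r 0 - n) hsort arr.length (le_refl _)
  have hlr : pvBelow arr (arr.getD r 0 - n) 0 arr.length ≤ r := by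
    by_contra hc
    have := hs.2.1 r (by omega)
    omega
  split_ifs with h
  · omega
  · have : ((pvBelow arr (arr.getD r 0 - n) 0 arr.length : Nat) : Int) ≤ (r : Int) := by
      exact_mod_cast hlr
    omega

-- the two folds agree: A's carried left pointer always equals B's binary-searched window start
theorem pv_fold (arr : List Int) (n : Int) (hsort : arr.Pairwise (· ≤ ·)) (hn : 0 < n) :
    ∀ k, k ≤ arr.length →
    ((List.range k).foldl (pvStepA arr n) (0, n)).1 ≤ k ∧
    (∀ j, j < ((List.range k).foldl (pvStepA arr n) (0, n)).1 → k < arr.length →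
        n ≤ arr.getD k 0 - arr.getD j 0) ∧
    ((List.range k).foldl (pvStepA arr n) (0, n)).2 = (List.range k).foldl (pvStepB arr n) n := by
  intro k
  induction k with
  | zero =>
    intro _
    exact ⟨le_refl 0, by intro j hj; simp [List.range_zero] at hj, rfl⟩
  | succ k ih =>
    intro hk
    have hklt : k < arr.length := by omega
    obtain ⟨ih1, ih2, ih3⟩ := ih (by omega)
    simp only [List.range_succ, List.foldl_append, List.foldl_cons, List.foldl_nil]
    set stA := (List.range k).foldl (pvStepA arr n) (0, n) with hstA
    set lowB := (List.range k).foldl (pvStepB arr n) n with hlowB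
    have hadv := pvAdvance_spec arr n k stA.1 ih1
    set left := pvAdvance arr n k stA.1 with hleft
    have hfalse : ∀ j, j < left → n ≤ arr.getD k 0 - arr.getD j 0 := by
      intro j hj
      rcases Nat.lt_or_ge j stA.1 with hj' | hj'
      · exact ih2 j hj' hklt
      · exact hadv.2.2.1 j hj' hj
    have hs := pvBelow_spec arr (arr.getD k 0 - n) hsort arr.length (le_refl _)
    set m := pvBelow arr (arr.getD k 0 - n) 0 arr.length with hmdef
    have hmk : m ≤ k := by
      by_contra hc
      have := hs.2.1 k (by omega)
      omega
    have hml : m = left := by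
      by_contra hne
      rcases Nat.lt_or_ge m left with hlt | hge
      · -- m < left ≤ k: the carried invariant says arr[m] ≤ v, the search failure says v < arr[m]
        have h1 := hfalse m hlt
        have h2 := hs.2.2 (by omega)
        omega
      · -- left < m ≤ k: the search says arr[left] ≤ v, but A's while stopped: span(left) < n
        have hlm : left < m := by omega
        have h1 := hs.2.1 left hlm
        have h2 := hadv.2.2.2 (by omega)
        omega
    have hcondNext : ∀ j, j < left → k + 1 < arr.length →
        n ≤ arr.getD (k + 1) 0 - arr.getD j 0 := by
      intro j hj hlt
      have h1 := hfalse j hj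
      have h2 := pv_getD_mono arr hsort (i := k) (j := k + 1) (by omega) hlt
      omega
    have hlk : left ≤ k := hadv.2.1
    simp only [pvStepA, pvStepB, pvMv, ih3, ← hleft, ← hmdef, hml]
    have hcast : (k : Int) + 1 - (left : Nat) = (k : Int) - left + 1 := by ring
    rw [hcast]
    split_ifs with hcond
    · exact ⟨Nat.le_succ_of_le hlk, fun j hj hlt => hcondNext j hj hlt, rfl⟩
    · exact ⟨Nat.le_succ_of_le hlk, fun j hj hlt => hcondNext j hj hlt, rfl⟩

-- ===== VERDICT (by name: the statement is the Claim_ definition above) =====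
theorem numMovesStonesII_spec : Claim_equal_numMovesStonesII := by
  intro stones _ hpre
  unfold Pre_numMovesStonesII at hpre
  unfold Spec_numMovesStonesII numMovesStonesII numMovesStonesII_alt
  have hsort : (PySem.List.sorted stones (fun x => x) false).Pairwise (· ≤ ·) :=
    PySem.List.sorted_pairwise stones (fun x => x)
  set arr := PySem.List.sorted stones (fun x => x) false with harr
  have hlen : arr.length = stones.length := PySem.List.length_sorted stones _ _
  have hn2 : 2 ≤ arr.length := by omega
  have hfold := pv_fold arr (arr.length : Int) hsort (by exact_mod_cast Nat.lt_of_lt_of_le (by omega) hn2)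
      arr.length (le_refl _)
  obtain ⟨m, hm⟩ : ∃ m, arr.length = m + 1 := ⟨arr.length - 1, by omega⟩
  have hB : (List.range arr.length).foldl (pvStepB arr (arr.length : Int)) (arr.length : Int)
      = (match (List.range arr.length).map (pvMv arr (arr.length : Int)) with
         | [] => (0 : Int)
         | x :: xs => xs.foldl min x) := by
    rw [hm, List.range_succ_eq_map, List.map_cons, List.foldl_cons]
    have hmin : pvStepB arr ((m + 1 : Nat) : Int) ((m + 1 : Nat) : Int) 0 =
        pvMv arr ((m + 1 : Nat) : Int) 0 :=
      min_eq_right (pvMv_le arr _ hsort (by push_cast; omega) 0)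
    rw [hmin]
    show _ = ((List.map Nat.succ (List.range m)).map (pvMv arr ((m + 1 : Nat) : Int))).foldl min
        (pvMv arr ((m + 1 : Nat) : Int) 0)
    simp only [List.foldl_map]
    rfl
  exact List.cons_eq_cons.mpr ⟨hfold.2.2.trans hB, List.cons_eq_cons.mpr ⟨by omega, rfl⟩⟩
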